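-- pv_equiv track=rewrite | github.com/himanchal-103/Dynamic-programming-problems | Min-cost-for-tickets.py | minCost_recursion
-- ===== SOURCE A (Python) =====
-- def minCost_recursion(n, days, cost, index):
--     # Base case: if indexis after travelling day
--     if index >= n:
--         return 0
--
--     # 1 day pass
--     option1 = cost[0] + minCost_recursion(n, days, cost, index + 1)
--
--     # 7 day pass
--     i = index
--     while i < n and days[i] < days[index] + 7:
--         i += 1
--     option2 = cost[1] + minCost_recursion(n, days, cost, i)
--
--     # 30 days  pass
--     i = index
--     while i < n and days[i] < days[index] + 30:
--         i += 1
--     option3 = cost[2] + minCost_recursion(n, days, cost, i)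
--
--     return min(option1, option2, option3)
-- ===== SOURCE B (Python) =====
-- def minCost_recursion(n, days, cost, index):
--     # Bottom-up DP over indices instead of naive triple-branch recursion.
--     if index >= n:
--         return 0
--     dp = {}
--     i = n - 1
--     while i >= index:
--         j = i
--         while j < n and days[j] < days[i] + 7:
--             j += 1
--         k = j
--         while k < n and days[k] < days[i] + 30:
--             k += 1
--         option1 = cost[0] + (dp[i + 1] if i + 1 < n else 0)
--         option2 = cost[1] + (dp[j] if j < n else 0)
--         option3 = cost[2] + (dp[k] if k < n else 0)
--         dp[i] = min(option1, option2, option3)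
--         i -= 1
--     return dp[index]
-- ===== Notes on version B (the rewrite author's own statement) =====
-- stated objective: alternative
-- what changed: Replaced A's top-down triple-branch recursion by a bottom-up DP filling a dict dp[i] once for each i from n-1 down to index, with the 30-day scan resuming from the 7-day scan's endpoint.
import Mathlib
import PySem

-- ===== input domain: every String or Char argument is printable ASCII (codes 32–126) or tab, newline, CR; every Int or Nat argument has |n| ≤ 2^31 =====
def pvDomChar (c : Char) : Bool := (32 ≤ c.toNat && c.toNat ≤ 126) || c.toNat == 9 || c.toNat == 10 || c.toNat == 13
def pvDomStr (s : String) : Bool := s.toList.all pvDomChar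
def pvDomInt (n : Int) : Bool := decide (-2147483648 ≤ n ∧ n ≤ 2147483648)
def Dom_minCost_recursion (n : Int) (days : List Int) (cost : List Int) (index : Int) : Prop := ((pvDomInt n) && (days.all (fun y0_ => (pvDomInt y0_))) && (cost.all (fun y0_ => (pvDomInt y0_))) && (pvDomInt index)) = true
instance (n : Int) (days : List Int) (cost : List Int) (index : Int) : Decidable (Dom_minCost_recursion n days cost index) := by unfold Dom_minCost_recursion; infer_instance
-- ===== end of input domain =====

-- B replaces A's top-down triple-branch recursion by a bottom-up DP table over indices (each dp[i] stored in a dict, filled from n-1 down to index).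

-- ===== PORT A =====
-- the while loop 'i = start; while i < n and days[i] < target: i += 1' (shared shape of A's and B's scans)
def pvJump (n : Int) (days : List Int) (target : Int) (i : Int) : Int :=
  if h : i < n ∧ (PySem.List.pyGet? days i).getD 0 < target then
    pvJump n days target (i + 1)
  else i
termination_by (n - i).toNat
decreasing_by omega

-- lower bound on the scan result, cited by the ports' termination proofs
theorem pvJump_ge (n : Int) (days : List Int) (t i : Int) : i ≤ pvJump n days t i := by
  rw [pvJump]
  split
  · have := pvJump_ge n days t (i + 1)
    omega
  · omega
termination_by (n - i).toNat
decreasing_by omega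

theorem pvJump_gt (n : Int) (days : List Int) (i c : Int) (hi : i < n) (hc : 0 < c) :
    i < pvJump n days ((PySem.List.pyGet? days i).getD 0 + c) i := by
  rw [pvJump, dif_pos ⟨hi, by omega⟩]
  have := pvJump_ge n days ((PySem.List.pyGet? days i).getD 0 + c) (i + 1)
  omega

def minCost_recursion (n : Int) (days : List Int) (cost : List Int) (index : Int) : Int :=
  if index ≥ n then 0
  else
    min ((PySem.List.pyGet? cost 0).getD 0 + minCost_recursion n days cost (index + 1))
      (min ((PySem.List.pyGet? cost 1).getD 0 +
            minCost_recursion n days cost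
              (pvJump n days ((PySem.List.pyGet? days index).getD 0 + 7) index))
           ((PySem.List.pyGet? cost 2).getD 0 +
            minCost_recursion n days cost
              (pvJump n days ((PySem.List.pyGet? days index).getD 0 + 30) index)))
termination_by (n - index).toNat
decreasing_by
  · omega
  · have := pvJump_gt n days index 7 (by omega) (by omega)
    omega
  · have := pvJump_gt n days index 30 (by omega) (by omega)
    omega

-- ===== PORT B =====
-- the body of B's while loop: the value stored as dp[i]
def pvStep (n : Int) (days : List Int) (cost : List Int) (dp : PySem.Dict Int Int) (i : Int) : Int :=
  min ((PySem.List.pyGet? cost 0).getD 0 + (if i + 1 < n then dp.getD (i + 1) 0 else 0))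
    (min ((PySem.List.pyGet? cost 1).getD 0 +
          (if pvJump n days ((PySem.List.pyGet? days i).getD 0 + 7) i < n then
            dp.getD (pvJump n days ((PySem.List.pyGet? days i).getD 0 + 7) i) 0 else 0))
         ((PySem.List.pyGet? cost 2).getD 0 +
          (if pvJump n days ((PySem.List.pyGet? days i).getD 0 + 30)
                (pvJump n days ((PySem.List.pyGet? days i).getD 0 + 7) i) < n then
            dp.getD (pvJump n days ((PySem.List.pyGet? days i).getD 0 + 30)
                (pvJump n days ((PySem.List.pyGet? days i).getD 0 + 7) i)) 0 else 0)))

-- B's outer while loop: fill dp[i] for i = n-1 down to index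
def pvFill (n : Int) (days : List Int) (cost : List Int) (index : Int) (i : Int)
    (dp : PySem.Dict Int Int) : PySem.Dict Int Int :=
  if h : i ≥ index then
    pvFill n days cost index (i - 1) (dp.insert i (pvStep n days cost dp i))
  else dp
termination_by (i - index + 1).toNat
decreasing_by omega

def minCost_recursion_alt (n : Int) (days : List Int) (cost : List Int) (index : Int) : Int :=
  if index ≥ n then 0
  else (pvFill n days cost index (n - 1) PySem.Dict.empty).getD index 0

-- ===== PRECONDITION & SPEC =====
-- Pre_ excludes exactly the inputs on which Python A raises (IndexError): index < n together with
-- days shorter than n, index below -len(days), or fewer than three ticket costs.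
def Pre_minCost_recursion (n : Int) (days : List Int) (cost : List Int) (index : Int) : Prop :=
  n ≤ index ∨ (-(days.length : Int) ≤ index ∧ n ≤ (days.length : Int) ∧ 3 ≤ cost.length)
instance (n : Int) (days : List Int) (cost : List Int) (index : Int) : Decidable (Pre_minCost_recursion n days cost index) := by unfold Pre_minCost_recursion; infer_instance

def pvWitness_minCost_recursion : Int × List Int × List Int × Int := (2, [1, 4], [2, 7, 25], 0)

def Spec_minCost_recursion (n : Int) (days : List Int) (cost : List Int) (index : Int) (out : Int) : Prop := out = minCost_recursion_alt n days cost index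
instance (n : Int) (days : List Int) (cost : List Int) (index : Int) (out : Int) : Decidable (Spec_minCost_recursion n days cost index out) := by unfold Spec_minCost_recursion; infer_instance

-- ===== CLAIM (what is proved, stated in full; the proofs are below) =====
def Claim_equal_minCost_recursion : Prop := ∀ (n : Int) (days : List Int) (cost : List Int) (index : Int), Dom_minCost_recursion n days cost index → Pre_minCost_recursion n days cost index → Spec_minCost_recursion n days cost index (minCost_recursion n days cost index)

-- ===== LEMMAS AND PROOFS =====

theorem pvJump_trans (n : Int) (days : List Int) (t1 t2 i : Int) (h : t1 ≤ t2) :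
    pvJump n days t2 (pvJump n days t1 i) = pvJump n days t2 i := by
  by_cases hc : i < n ∧ (PySem.List.pyGet? days i).getD 0 < t1
  · have e1 : pvJump n days t1 i = pvJump n days t1 (i + 1) := by
      rw [pvJump, dif_pos hc]
    rw [e1, pvJump_trans n days t1 t2 (i + 1) h]
    conv_rhs => rw [pvJump, dif_pos ⟨hc.1, by omega⟩]
  · have e1 : pvJump n days t1 i = i := by
      rw [pvJump, dif_neg hc]
    rw [e1]
termination_by (n - i).toNat
decreasing_by omega

theorem minCost_base (n : Int) (days : List Int) (cost : List Int) (index : Int)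
    (h : n ≤ index) : minCost_recursion n days cost index = 0 := by
  rw [minCost_recursion, if_pos (by omega : index ≥ n)]

theorem pvStep_eq (n : Int) (days : List Int) (cost : List Int) (dp : PySem.Dict Int Int)
    (i : Int) (hi : i < n)
    (hdp : ∀ j, i < j → j < n → dp.getD j 0 = minCost_recursion n days cost j) :
    pvStep n days cost dp i = minCost_recursion n days cost i := by
  have hj7 := pvJump_gt n days i 7 hi (by omega)
  have hj30 : i < pvJump n days ((PySem.List.pyGet? days i).getD 0 + 30)
      (pvJump n days ((PySem.List.pyGet? days i).getD 0 + 7) i) := by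
    have := pvJump_ge n days ((PySem.List.pyGet? days i).getD 0 + 30)
      (pvJump n days ((PySem.List.pyGet? days i).getD 0 + 7) i)
    omega
  conv_rhs => rw [minCost_recursion, if_neg (by omega : ¬ i ≥ n)]
  rw [pvStep, pvJump_trans n days ((PySem.List.pyGet? days i).getD 0 + 7)
    ((PySem.List.pyGet? days i).getD 0 + 30) i (by omega)]
  congr 1
  · -- option1
    by_cases h1 : i + 1 < n
    · rw [if_pos h1, hdp (i + 1) (by omega) h1]
    · rw [if_neg h1, minCost_base n days cost (i + 1) (by omega)]
  congr 1
  · by_cases h2 : pvJump n days ((PySem.List.pyGet? days i).getD 0 + 7) i < n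
    · rw [if_pos h2, hdp _ hj7 h2]
    · rw [if_neg h2, minCost_base n days cost _ (by omega)]
  · by_cases h3 : pvJump n days ((PySem.List.pyGet? days i).getD 0 + 30) i < n
    · rw [if_pos h3, hdp _ (by rw [← pvJump_trans n days ((PySem.List.pyGet? days i).getD 0 + 7)
          ((PySem.List.pyGet? days i).getD 0 + 30) i (by omega)]; exact hj30)
          h3]
    · rw [if_neg h3, minCost_base n days cost _ (by omega)]

theorem pvFill_correct (n : Int) (days : List Int) (cost : List Int) (index : Int) :
    ∀ (fuel : Nat) (i : Int) (dp : PySem.Dict Int Int), (i - index + 1).toNat ≤ fuel →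
    i < n →
    (∀ j, i < j → j < n → dp.getD j 0 = minCost_recursion n days cost j) →
    ∀ j, (index ≤ j ∨ i < j) → j < n →
      (pvFill n days cost index i dp).getD j 0 = minCost_recursion n days cost j := by
  intro fuel
  induction fuel with
  | zero =>
    intro i dp hf hi hdp j hj hjn
    rw [pvFill, dif_neg (by omega)]
    exact hdp j (by omega) hjn
  | succ m ih =>
    intro i dp hf hi hdp j hj hjn
    rw [pvFill]
    split
    · next hge =>
      refine ih (i - 1) _ (by omega) (by omega) ?_ j (by omega) hjn
      intro j' hj' hj'n
      rw [PySem.Dict.getD_insert]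
      split
      · next heq =>
        subst heq
        exact pvStep_eq n days cost dp j' hj'n hdp
      · next hne =>
        exact hdp j' (by omega) hj'n
    · exact hdp j (by omega) hjn

theorem minCost_eq_alt (n : Int) (days : List Int) (cost : List Int) (index : Int) :
    minCost_recursion n days cost index = minCost_recursion_alt n days cost index := by
  rw [minCost_recursion_alt]
  by_cases h : index ≥ n
  · rw [if_pos h, minCost_base n days cost index (by omega)]
  · rw [if_neg h]
    exact (pvFill_correct n days cost index (n - 1 - index + 1).toNat (n - 1) PySem.Dict.empty
      (by omega) (by omega) (by intro j hj hjn; omega) index (Or.inl le_rfl) (by omega)).symm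

-- ===== VERDICT (by name: the statement is the Claim_ definition above) =====
theorem minCost_recursion_spec : Claim_equal_minCost_recursion := by
  intro n days cost index _ _
  exact minCost_eq_alt n days cost index
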